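-- pv_equiv track=rewrite | github.com/wandir-tech/supersubset | packages/docs/scripts/rewire-config-screenshots.py | find_best_fallback
-- ===== SOURCE A (Python) =====
-- def find_best_fallback(slug, category, available):
--     """For files without props screenshots, find the best available screenshot."""
--     cat_screenshots = available.get(category, [])
--
--     # Priority order for fallbacks
--     candidates = []
--     for s in cat_screenshots:
--         if slug in s:
--             candidates.append(s)
--
--     # Prefer designer screenshots
--     designer = [c for c in candidates if 'designer' in c]
--     viewer = [c for c in candidates if 'viewer' in c]
--
--     if designer:
--         return designer[0]
--     if viewer:
--         return viewer[0]
--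
--     # If no slug match, use any screenshot from the category
--     if cat_screenshots:
--         designer_any = [c for c in cat_screenshots if 'designer' in c]
--         if designer_any:
--             return designer_any[0]
--         return cat_screenshots[0]
--
--     return None
-- ===== SOURCE B (Python) =====
-- def find_best_fallback(slug, category, available):
--     """Single pass over the category's screenshots, recording each priority
--     candidate on first occurrence; then walk the priority ladder."""
--     slug_designer = slug_viewer = any_designer = first = None
--     for s in available.get(category, []):
--         if first is None:
--             first = s
--         if any_designer is None and 'designer' in s:
--             any_designer = s
--         if slug in s:
--             if slug_designer is None and 'designer' in s:
--                 slug_designer = s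
--             if slug_viewer is None and 'viewer' in s:
--                 slug_viewer = s
--     if slug_designer is not None:
--         return slug_designer
--     if slug_viewer is not None:
--         return slug_viewer
--     if first is None:
--         return None
--     return any_designer if any_designer is not None else first
-- ===== Notes on version B (the rewrite author's own statement) =====
-- stated objective: alternative
-- what changed: Replaces the candidate list plus three filter comprehensions with one pass over the category's screenshots that records four first-occurrence candidates (slug+designer, slug+viewer, any designer, first element) and then walks the priority ladder.
import Mathlib
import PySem

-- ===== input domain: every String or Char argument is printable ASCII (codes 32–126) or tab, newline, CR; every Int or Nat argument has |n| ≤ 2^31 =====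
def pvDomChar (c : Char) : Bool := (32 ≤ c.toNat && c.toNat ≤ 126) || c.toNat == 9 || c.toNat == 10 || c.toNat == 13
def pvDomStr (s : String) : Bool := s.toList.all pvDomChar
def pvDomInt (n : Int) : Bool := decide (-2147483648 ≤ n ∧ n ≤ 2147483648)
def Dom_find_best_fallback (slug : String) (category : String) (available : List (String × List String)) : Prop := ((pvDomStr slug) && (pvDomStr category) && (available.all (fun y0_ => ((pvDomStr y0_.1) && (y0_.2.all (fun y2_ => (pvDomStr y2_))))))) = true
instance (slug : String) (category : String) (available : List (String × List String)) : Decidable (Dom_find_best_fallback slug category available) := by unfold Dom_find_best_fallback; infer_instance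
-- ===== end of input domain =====

-- ===== PORT A =====
-- B does the same selection in one pass with first-occurrence accumulators instead of
-- A's candidate list plus three filter comprehensions (objective: alternative decomposition).
def find_best_fallback (slug : String) (category : String) (available : List (String × List String)) : Option String :=
  let cat_screenshots := PySem.Dict.getD (PySem.Dict.mk available) category []
  let candidates := cat_screenshots.foldl
    (fun acc s => if PySem.Str.isIn slug s then acc ++ [s] else acc) []
  let designer := candidates.filter (fun c => PySem.Str.isIn "designer" c)
  let viewer := candidates.filter (fun c => PySem.Str.isIn "viewer" c)
  match designer with
  | d :: _ => some d
  | [] =>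
    match viewer with
    | v :: _ => some v
    | [] =>
      match cat_screenshots with
      | [] => none
      | first :: _ =>
        match cat_screenshots.filter (fun c => PySem.Str.isIn "designer" c) with
        | d :: _ => some d
        | [] => some first

-- ===== PORT B =====
-- one loop step: record each of the four candidates on its first occurrence
def fbfStep (slug : String)
    (st : Option String × Option String × Option String × Option String) (s : String) :
    Option String × Option String × Option String × Option String :=
  let (sd, sv, ad, fst) := st
  let fst := if fst.isNone then some s else fst
  let ad := if ad.isNone && PySem.Str.isIn "designer" s then some s else ad
  if PySem.Str.isIn slug s then
    let sd := if sd.isNone && PySem.Str.isIn "designer" s then some s else sd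
    let sv := if sv.isNone && PySem.Str.isIn "viewer" s then some s else sv
    (sd, sv, ad, fst)
  else
    (sd, sv, ad, fst)

def find_best_fallback_alt (slug : String) (category : String) (available : List (String × List String)) : Option String :=
  let cat := PySem.Dict.getD (PySem.Dict.mk available) category []
  match cat.foldl (fbfStep slug) (none, none, none, none) with
  | (some d, _, _, _) => some d
  | (none, some v, _, _) => some v
  | (none, none, _, none) => none
  | (none, none, ad, some fst) => some (ad.getD fst)

-- ===== PRECONDITION & SPEC =====
def Spec_find_best_fallback (slug : String) (category : String) (available : List (String × List String)) (out : Option String) : Prop := out = find_best_fallback_alt slug category available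
instance (slug : String) (category : String) (available : List (String × List String)) (out : Option String) : Decidable (Spec_find_best_fallback slug category available out) := by unfold Spec_find_best_fallback; infer_instance

-- ===== CLAIM (what is proved, stated in full; the proofs are below) =====
def Claim_equal_find_best_fallback : Prop := ∀ (slug : String) (category : String) (available : List (String × List String)), Dom_find_best_fallback slug category available → Spec_find_best_fallback slug category available (find_best_fallback slug category available)

-- ===== LEMMAS AND PROOFS =====
theorem fbf_fold_eq (slug : String) (l : List String)
    (sd sv ad fst : Option String) :
    l.foldl (fbfStep slug) (sd, sv, ad, fst) =
      (sd.or ((l.filter (fun s => PySem.Str.isIn "designer" s && PySem.Str.isIn slug s)).head?),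
       sv.or ((l.filter (fun s => PySem.Str.isIn "viewer" s && PySem.Str.isIn slug s)).head?),
       ad.or ((l.filter (fun s => PySem.Str.isIn "designer" s)).head?),
       fst.or l.head?) := by
  induction l generalizing sd sv ad fst with
  | nil => simp
  | cons s t ih =>
    simp only [List.foldl_cons, List.filter_cons, fbfStep]
    cases sd <;> cases sv <;> cases ad <;> cases fst <;>
      cases h1 : PySem.Str.isIn slug s <;>
      cases h2 : PySem.Str.isIn "designer" s <;>
      cases h3 : PySem.Str.isIn "viewer" s <;>
      simp [ih, Option.or]

-- ===== VERDICT (by name: the statement is the Claim_ definition above) =====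
theorem find_best_fallback_spec : Claim_equal_find_best_fallback := by
  intro slug category available _
  unfold Spec_find_best_fallback
  simp only [find_best_fallback, find_best_fallback_alt, fbf_fold_eq,
    PySem.List.foldl_append_if_eq_filter, List.nil_append, List.filter_filter,
    Option.none_or]
  set l := PySem.Dict.getD (PySem.Dict.mk available) category [] with hl
  cases h1 : l.filter (fun s => PySem.Str.isIn "designer" s && PySem.Str.isIn slug s) with
  | cons d t => simp [List.head?]
  | nil =>
    cases h2 : l.filter (fun s => PySem.Str.isIn "viewer" s && PySem.Str.isIn slug s) with
    | cons v t => simp [List.head?]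
    | nil =>
      cases l with
      | nil => simp
      | cons f t =>
        cases h3 : (f :: t).filter (fun s => PySem.Str.isIn "designer" s) with
        | nil => simp [List.head?]
        | cons d dt => simp [List.head?]
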